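-- pv_equiv track=rewrite | github.com/PdxCodeGuild/Full-Stack-Day-Class | practice/solutions/pantheon/pantheon/models.py | _group_persons_by_country_code_then_industry
-- ===== SOURCE A (Python) =====
-- from operator import itemgetter
--
-- def group_by(iterable, key):
--     """Place each item in an iterable into a bucket based on calling the key
--     function on the item."""
--     group_to_items = {}
--     for item in iterable:
--         group = key(item)
--         if group not in group_to_items:
--             group_to_items[group] = []
--         group_to_items[group].append(item)
--     return group_to_items
--
-- def _group_persons_by_country_code(people):
--     """Group a list of people dicts by country code.
--
--     >>> _group_persons_by_country_code([
--     ...     {'name': 'David', 'countryCode': 'US'},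
--     ...     {'name': 'Helen', 'countryCode': 'GB'},
--     ...     {'name': 'Sarah', 'countryCode': 'US'},
--     ... ]) == {
--     ...     'US': [{'name': 'David', 'countryCode': 'US'}, {'name': 'Sarah', 'countryCode': 'US'}],
--     ...     'GB': [{'name': 'Helen', 'countryCode': 'GB'}],
--     ... }
--     True
--     """
--     return group_by(people, itemgetter('countryCode'))
--
-- def _group_persons_by_industry(people):
--     """Group a list of people dicts by industry.
--
--     >>> _group_persons_by_industry([
--     ...     {'name': 'David', 'industry': 'OUTLAW'},
--     ...     {'name': 'Helen', 'industry': 'ACTIVIST'},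
--     ...     {'name': 'Sarah', 'industry': 'ACTIVIST'},
--     ... ]) == {
--     ...     'ACTIVIST': [{'name': 'Helen', 'industry': 'ACTIVIST'}, {'name': 'Sarah', 'industry': 'ACTIVIST'}],
--     ...     'OUTLAW': [{'name': 'David', 'industry': 'OUTLAW'}],
--     ... }
--     True
--     """
--     return group_by(people, itemgetter('industry'))
--
-- def _group_persons_by_country_code_then_industry(people):
--     """Group a list of people dicts into two nested dicts, first by country code, then by industry.
--
--     >>> _group_persons_by_country_code_then_industry([
--     ...     {'name': 'David', 'countryCode': 'US', 'industry': 'OUTLAW'},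
--     ...     {'name': 'Helen', 'countryCode': 'GB', 'industry': 'ACTIVIST'},
--     ...     {'name': 'Sarah', 'countryCode': 'US', 'industry': 'ACTIVIST'},
--     ... ]) == {
--     ...     'US': {
--     ...         'ACTIVIST': [{'name': 'Sarah', 'countryCode': 'US', 'industry': 'ACTIVIST'}],
--     ...         'OUTLAW': [{'name': 'David', 'countryCode': 'US', 'industry': 'OUTLAW'}],
--     ...     },
--     ...     'GB': {
--     ...         'ACTIVIST': [{'name': 'Helen', 'countryCode': 'GB', 'industry': 'ACTIVIST'}],
--     ...     }
--     ... }
--     True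
--     """
--     country_code_to_people = _group_persons_by_country_code(people)
--     country_code_to_industry_to_people = {
--         country_code: _group_persons_by_industry(country_persons)
--         for country_code, country_persons
--         in country_code_to_people.items()
--     }
--     return country_code_to_industry_to_people
-- ===== SOURCE B (Python) =====
-- def _group_persons_by_country_code_then_industry(people):
--     """Single pass: insert each person into a nested dict keyed by country
--     code then industry, instead of grouping by country and re-grouping each
--     bucket by industry."""
--     result = {}
--     for person in people:
--         country = person['countryCode']
--         industry = person['industry']
--         result.setdefault(country, {}).setdefault(industry, []).append(person)
--     return result
-- ===== Notes on version B (the rewrite author's own statement) =====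
-- stated objective: simpler
-- what changed: Replaces the two-pass pipeline (group all people by country, then re-group every country bucket by industry) by a single loop that inserts each person directly into the nested dict via setdefault.
import Mathlib
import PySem

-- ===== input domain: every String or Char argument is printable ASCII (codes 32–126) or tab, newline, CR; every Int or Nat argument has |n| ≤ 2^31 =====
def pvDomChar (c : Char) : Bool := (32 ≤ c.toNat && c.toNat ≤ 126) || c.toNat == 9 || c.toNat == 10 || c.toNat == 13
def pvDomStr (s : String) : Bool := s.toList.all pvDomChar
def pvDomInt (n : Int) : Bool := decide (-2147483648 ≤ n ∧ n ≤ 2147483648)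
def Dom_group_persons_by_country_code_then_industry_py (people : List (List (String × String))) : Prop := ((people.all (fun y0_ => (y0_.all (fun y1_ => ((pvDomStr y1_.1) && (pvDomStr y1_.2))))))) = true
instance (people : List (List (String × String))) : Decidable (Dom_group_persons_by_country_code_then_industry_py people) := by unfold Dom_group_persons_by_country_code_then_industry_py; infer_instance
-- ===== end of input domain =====

-- B builds the nested country→industry→people dict in ONE pass with nested setdefault,
-- instead of A's two passes (group by country, then re-group each bucket by industry).
-- Equivalence is about return values; neither version mutates its argument.

-- ===== PORT A =====

-- person[k] : first-match dict lookup; Pre_ guarantees the key is present (Python raises KeyError otherwise)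
def pvItem (p : List (String × String)) (k : String) : String :=
  (PySem.Dict.mk p).getD k ""

-- group_by(iterable, key): 'if group not in d: d[group] = []; d[group].append(item)' = modify key [] (· ++ [item])
def pvGroupBy (key : List (String × String) → String)
    (xs : List (List (String × String))) : PySem.Dict String (List (List (String × String))) :=
  xs.foldl (fun d x => d.modify (key x) [] (fun l => l ++ [x])) PySem.Dict.empty

def group_persons_by_country_code_then_industry_py (people : List (List (String × String))) : List (String × List (String × List (List (String × String)))) :=
  let byCC := pvGroupBy (fun p => pvItem p "countryCode") people
  byCC.items.map (fun q => (q.1, (pvGroupBy (fun p => pvItem p "industry") q.2).items))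

-- ===== PORT B =====

-- result.setdefault(country, {}).setdefault(industry, []).append(person)
-- = modify country ∅ (inner ↦ inner.modify industry [] (· ++ [person]))  (value semantics of the aliased mutation)
def group_persons_by_country_code_then_industry_py_alt (people : List (List (String × String))) : List (String × List (String × List (List (String × String)))) :=
  let result := people.foldl
    (fun d p =>
      d.modify (pvItem p "countryCode") PySem.Dict.empty
        (fun inner => inner.modify (pvItem p "industry") [] (fun l => l ++ [p])))
    PySem.Dict.empty
  result.items.map (fun q => (q.1, q.2.items))

-- ===== PRECONDITION & SPEC =====
-- Pre_ excludes exactly the inputs where the Python A raises KeyError: some person lacks 'countryCode' or 'industry' (B raises the same KeyError there).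
def Pre_group_persons_by_country_code_then_industry_py (people : List (List (String × String))) : Prop :=
  (people.all (fun p => (PySem.Dict.mk p).contains "countryCode" && (PySem.Dict.mk p).contains "industry")) = true
instance (people : List (List (String × String))) : Decidable (Pre_group_persons_by_country_code_then_industry_py people) := by unfold Pre_group_persons_by_country_code_then_industry_py; infer_instance

def pvWitness_group_persons_by_country_code_then_industry_py : (List (List (String × String))) :=
  [[("name", "David"), ("countryCode", "US"), ("industry", "OUTLAW")],
   [("name", "Helen"), ("countryCode", "GB"), ("industry", "ACTIVIST")],
   [("name", "Sarah"), ("countryCode", "US"), ("industry", "ACTIVIST")]]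

def Spec_group_persons_by_country_code_then_industry_py (people : List (List (String × String))) (out : List (String × List (String × List (List (String × String))))) : Prop := out = group_persons_by_country_code_then_industry_py_alt people
instance (people : List (List (String × String))) (out : List (String × List (String × List (List (String × String))))) : Decidable (Spec_group_persons_by_country_code_then_industry_py people out) := by
  unfold Spec_group_persons_by_country_code_then_industry_py
  letI i2 : DecidableEq (List (List (String × String))) := inferInstance
  letI i3 : DecidableEq (String × List (List (String × String))) := instDecidableEqProd
  letI i4 : DecidableEq (List (String × List (List (String × String)))) := List.hasDecEq
  letI i5 : DecidableEq (String × List (String × List (List (String × String)))) := instDecidableEqProd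
  exact List.hasDecEq _ _

-- ===== CLAIM (what is proved, stated in full; the proofs are below) =====
def Claim_equal_group_persons_by_country_code_then_industry_py : Prop := ∀ (people : List (List (String × String))), Dom_group_persons_by_country_code_then_industry_py people → Pre_group_persons_by_country_code_then_industry_py people → Spec_group_persons_by_country_code_then_industry_py people (group_persons_by_country_code_then_industry_py people)

-- ===== LEMMAS AND PROOFS =====

-- transform a flat country→people dict into the nested country→(industry→people) dict
def pvTransform (ki : List (String × String) → String)
    (d : PySem.Dict String (List (List (String × String)))) :
    PySem.Dict String (PySem.Dict String (List (List (String × String)))) :=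
  PySem.Dict.mk (d.items.map (fun q => (q.1, pvGroupBy ki q.2)))

lemma pvTransform_get? (ki : List (String × String) → String)
    (d : PySem.Dict String (List (List (String × String)))) (c : String) :
    (pvTransform ki d).get? c = (d.get? c).map (pvGroupBy ki) := by
  obtain ⟨l⟩ := d
  induction l with
  | nil => rfl
  | cons q l ih =>
    simp only [pvTransform, PySem.Dict.get?, List.map_cons, List.find?] at *
    by_cases h : q.1 == c
    · simp [h]
    · simp only [h, Bool.false_eq_true] at *
      exact ih

lemma pvGroupBy_append (ki : List (String × String) → String)
    (xs : List (List (String × String))) (p : List (String × String)) :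
    pvGroupBy ki (xs ++ [p]) = (pvGroupBy ki xs).modify (ki p) [] (fun l => l ++ [p]) := by
  simp [pvGroupBy, List.foldl_append]

lemma pvStep (ki : List (String × String) → String)
    (d : PySem.Dict String (List (List (String × String))))
    (c i : String) (p : List (String × String)) (hip : ki p = i) :
    (pvTransform ki d).modify c PySem.Dict.empty
        (fun inner => inner.modify i [] (fun l => l ++ [p]))
      = pvTransform ki (d.modify c [] (fun l => l ++ [p])) := by
  apply PySem.Dict.ext
  by_cases hc : d.contains c = true
  · obtain ⟨ps, hps⟩ : ∃ ps, d.get? c = some ps := by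
      rw [PySem.Dict.contains_eq_isSome_get?] at hc
      exact Option.isSome_iff_exists.mp hc
    have hTget : (pvTransform ki d).get? c = some (pvGroupBy ki ps) := by
      rw [pvTransform_get?, hps]; rfl
    have hTc : (pvTransform ki d).contains c = true := by
      rw [PySem.Dict.contains_eq_isSome_get?, hTget]; rfl
    have hgetD : d.getD c [] = ps := by simp [PySem.Dict.getD, hps]
    have hTgetD : (pvTransform ki d).getD c PySem.Dict.empty = pvGroupBy ki ps := by
      simp [PySem.Dict.getD, hTget]
    simp only [PySem.Dict.modify]
    rw [hTgetD, hgetD]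
    rw [PySem.Dict.items_insert_of_contains _ _ hTc]
    simp only [pvTransform]
    rw [PySem.Dict.items_insert_of_contains _ _ hc]
    simp only [List.map_map]
    apply List.map_congr_left
    intro q hq
    by_cases h1 : q.1 == c
    · have hq1 : q.1 = c := beq_iff_eq.mp h1
      simp [Function.comp, hq1, pvGroupBy_append, hip, PySem.Dict.modify]
    · simp [Function.comp, h1]
  · have hc' : d.contains c = false := by simpa using hc
    have hps : d.get? c = none := by
      rw [PySem.Dict.contains_eq_isSome_get?] at hc'
      simpa using hc'
    have hTget : (pvTransform ki d).get? c = none := by rw [pvTransform_get?, hps]; rfl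
    have hTc : (pvTransform ki d).contains c = false := by
      rw [PySem.Dict.contains_eq_isSome_get?, hTget]; rfl
    have hgetD : d.getD c [] = [] := by simp [PySem.Dict.getD, hps]
    have hTgetD : (pvTransform ki d).getD c PySem.Dict.empty = PySem.Dict.empty := by
      simp [PySem.Dict.getD, hTget]
    simp only [PySem.Dict.modify]
    rw [hTgetD, hgetD]
    rw [PySem.Dict.items_insert_of_not_contains _ _ hTc]
    simp only [pvTransform]
    rw [PySem.Dict.items_insert_of_not_contains _ _ hc']
    simp [pvGroupBy, hip, PySem.Dict.modify]

lemma pvFold (ki kc : List (String × String) → String)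
    (xs : List (List (String × String)))
    (d : PySem.Dict String (List (List (String × String)))) :
    xs.foldl
      (fun d p => d.modify (kc p) PySem.Dict.empty
        (fun inner => inner.modify (ki p) [] (fun l => l ++ [p])))
      (pvTransform ki d)
    = pvTransform ki
        (xs.foldl (fun d p => d.modify (kc p) [] (fun l => l ++ [p])) d) := by
  induction xs generalizing d with
  | nil => rfl
  | cons x xs ih =>
    simp only [List.foldl_cons]
    rw [pvStep ki d (kc x) (ki x) x rfl]
    exact ih _

-- ===== VERDICT (by name: the statement is the Claim_ definition above) =====
theorem group_persons_by_country_code_then_industry_py_spec : Claim_equal_group_persons_by_country_code_then_industry_py := by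
  intro people _ _
  show _ = _
  have h := pvFold (fun p => pvItem p "industry") (fun p => pvItem p "countryCode")
    people PySem.Dict.empty
  simp only [group_persons_by_country_code_then_industry_py,
    group_persons_by_country_code_then_industry_py_alt, pvGroupBy]
  rw [show (PySem.Dict.empty : PySem.Dict String (PySem.Dict String (List (List (String × String)))))
        = pvTransform (fun p => pvItem p "industry") PySem.Dict.empty from rfl] at *
  rw [h]
  simp [pvTransform, List.map_map, Function.comp, pvGroupBy]
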